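-- pv_equiv track=rewrite | github.com/qja1998/boj | 백준/Silver/1697. 숨바꼭질/숨바꼭질.py | solution
-- ===== SOURCE A (Python) =====
-- from collections import deque
--
-- def solution(N, K):
--     q = deque([(N, 0)])
--     visited = set([N])
--
--     if N == K:
--         return 0
--
--     while q:
--         cur_pos, time = q.popleft()
--         if cur_pos > K:
--             n_pos_list = [cur_pos - 1]
--         else:
--             n_pos_list = [cur_pos + 1, cur_pos - 1, cur_pos * 2]
--
--         for n_pos in n_pos_list:
--             if n_pos < 0:
--                 continue
--             if n_pos in visited:
--                 continue
--             if n_pos == K: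
--                 return time+1
--             q.append((n_pos, time+1))
--             visited.add(n_pos)
-- ===== SOURCE B (Python) =====
-- def solution(N, K):
--     # Backward divide-and-conquer on the target: min steps to even k is
--     # min(k - N, 1 + f(k // 2)); odd k is reached by a +-1 move from k-1 or k+1.
--     # O(log^2 K) instead of A's O(K) breadth-first search.
--     if K <= N:
--         return N - K
--     def f(k):
--         if k <= N:
--             return N - k
--         if k <= 1:
--             return k - N
--         if k % 2 == 0:
--             return min(k - N, 1 + f(k // 2))
--         return 1 + min(f(k - 1), f(k + 1))
--     return f(K)
-- ===== Notes on version B (the rewrite author's own statement) =====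
-- stated objective: faster
-- what changed: Replaces A's forward breadth-first search over the position graph by a backward divide-and-conquer recursion on the target (even k: min(k-N, 1+f(k//2)); odd k: 1+min(f(k-1), f(k+1))), O(log^2 K) instead of O(K).
-- outside the precondition, e.g. on solution(0, -26): A returns None, B returns 26; on solution(-7, 3): A returns None, B returns 10
import Mathlib
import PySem

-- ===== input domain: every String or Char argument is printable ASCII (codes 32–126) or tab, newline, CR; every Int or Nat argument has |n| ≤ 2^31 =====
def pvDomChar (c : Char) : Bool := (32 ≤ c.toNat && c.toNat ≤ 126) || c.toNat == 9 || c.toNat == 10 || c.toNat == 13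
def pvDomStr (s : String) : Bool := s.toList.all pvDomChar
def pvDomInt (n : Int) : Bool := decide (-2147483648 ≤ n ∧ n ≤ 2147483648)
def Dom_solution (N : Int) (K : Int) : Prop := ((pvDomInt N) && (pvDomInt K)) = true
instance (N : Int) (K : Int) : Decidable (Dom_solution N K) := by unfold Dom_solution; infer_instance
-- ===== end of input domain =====

-- B replaces A's breadth-first search over positions by a backward divide-and-conquer
-- recursion on the target (even k: min(k-N, 1+f(k//2)); odd k: 1+min(f(k-1), f(k+1))).
-- In port A the Python deque is the standard two-list functional queue, the Python list
-- being appended to is a reversed accumulator, and the Python set is a HashSet — exact,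
-- order-preserving models (iteration/membership results are identical).

-- ===== PORT A =====
-- inner 'for n_pos in n_pos_list' loop of A: either returns (Sum.inr) time+1,
-- or (Sum.inl) the updated back of the queue and the visited set.
-- 'q.append(p)' is modelled by consing p onto the queue's back list.
def procA (K : Int) (time : Int) :
    List Int → List (Int × Int) → Std.HashSet Int → (List (Int × Int) × Std.HashSet Int) ⊕ Int
  | [], back, v => Sum.inl (back, v)
  | n :: rest, back, v =>
    if n < 0 then procA K time rest back v
    else if v.contains n then procA K time rest back v
    else if n = K then Sum.inr (time + 1)
    else procA K time rest ((n, time + 1) :: back) (v.insert n)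

-- the 'while q' loop of A; the deque is the pair (front, back), front ++ back.reverse
-- in queue order, popleft takes the head of front (reversing back when front is empty).
-- The fuel only makes the loop total; N.toNat + 4*K.toNat + 8 steps always suffice
-- on the inputs admitted by Pre_ (the search space is the integers in [-1, 2K+1]).
def runA (K : Int) : Nat → List (Int × Int) → List (Int × Int) → Std.HashSet Int → Option Int
  | 0, _, _, _ => none
  | fuel + 1, [], back, v =>
    match back.reverse with
    | [] => none
    | (cur, time) :: q =>
      match procA K time (if cur > K then [cur - 1] else [cur + 1, cur - 1, cur * 2]) [] v with
      | Sum.inl (b', v') => runA K fuel q b' v'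
      | Sum.inr r => some r
  | fuel + 1, (cur, time) :: q, back, v =>
    match procA K time (if cur > K then [cur - 1] else [cur + 1, cur - 1, cur * 2]) back v with
    | Sum.inl (b', v') => runA K fuel q b' v'
    | Sum.inr r => some r

def solution (N : Int) (K : Int) : Int :=
  if N = K then 0
  else (runA K (N.toNat + 4 * K.toNat + 8) [(N, 0)] [] ((∅ : Std.HashSet Int).insert N)).getD 0

-- ===== PORT B =====
-- the inner helper 'f' of B: divide-and-conquer on the target k.  The fuel argument
-- only makes the structural recursion total (2*K.toNat + 4 always suffices, proved
-- below in fBf_eq_fB); each branch is Source B's code.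
def fBf (N : Int) : Nat → Int → Int
  | 0, _ => 0
  | fuel + 1, k =>
    if k ≤ N then N - k
    else if k ≤ 1 then k - N
    else if PySem.Int.mod k 2 = 0 then min (k - N) (1 + fBf N fuel (PySem.Int.floordiv k 2))
    else 1 + min (fBf N fuel (k - 1)) (fBf N fuel (k + 1))

def solution_alt (N : Int) (K : Int) : Int :=
  if K ≤ N then N - K else fBf N (2 * K.toNat + 4) K

-- ===== PRECONDITION & SPEC =====
-- Pre_ admits exactly the inputs on which A produces an int (N = K, both nonnegative,
-- or N = -1 with K ≥ 0); on every other input A's negative-pruned BFS exhausts its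
-- queue and falls through, returning None — not an int.
def Pre_solution (N : Int) (K : Int) : Prop :=
  N = K ∨ (0 ≤ N ∧ 0 ≤ K) ∨ (N = -1 ∧ 0 ≤ K)
instance (N : Int) (K : Int) : Decidable (Pre_solution N K) := by
  unfold Pre_solution; infer_instance

def pvWitness_solution : Int × Int := (3, 11)

def Spec_solution (N : Int) (K : Int) (out : Int) : Prop := out = solution_alt N K
instance (N : Int) (K : Int) (out : Int) : Decidable (Spec_solution N K out) := by
  unfold Spec_solution; infer_instance

-- ===== CLAIM (what is proved, stated in full; the proofs are below) =====
def Claim_equal_solution : Prop :=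
  ∀ (N : Int) (K : Int), Dom_solution N K → Pre_solution N K → Spec_solution N K (solution N K)

-- ===== LEMMAS AND PROOFS =====

-- fuel-free version of B's recursion, for the proofs (equal to fBf for ample fuel)
def fB (N : Int) (k : Int) : Int :=
  if k ≤ N then N - k
  else if k ≤ 1 then k - N
  else if PySem.Int.mod k 2 = 0 then min (k - N) (1 + fB N (PySem.Int.floordiv k 2))
  else 1 + min (fB N (k - 1)) (fB N (k + 1))
termination_by (2 * k.toNat + (if k % 2 = 1 ∧ 3 ≤ k then 3 else 0))
decreasing_by
  all_goals
    simp only [PySem.Int.floordiv_eq_ediv_of_pos (by omega : (0:Int) < 2),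
      PySem.Int.mod_eq_emod_of_pos (by omega : (0:Int) < 2)] at *
  all_goals split_ifs <;> omega

-- the fuel argument of the port is immaterial once it exceeds the termination measure
lemma fBf_eq_fB (N : Int) :
    ∀ (fuel : Nat) (k : Int),
      2 * k.toNat + (if k % 2 = 1 ∧ 3 ≤ k then 3 else 0) < fuel → fBf N fuel k = fB N k := by
  intro fuel
  induction fuel with
  | zero => intro k h; split_ifs at h <;> omega
  | succ fuel ih =>
    intro k h
    rw [fB]
    show (if k ≤ N then N - k
      else if k ≤ 1 then k - N
      else if PySem.Int.mod k 2 = 0 then min (k - N) (1 + fBf N fuel (PySem.Int.floordiv k 2))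
      else 1 + min (fBf N fuel (k - 1)) (fBf N fuel (k + 1))) = _
    by_cases h1 : k ≤ N
    · rw [if_pos h1, if_pos h1]
    · rw [if_neg h1, if_neg h1]
      by_cases h2 : k ≤ 1
      · rw [if_pos h2, if_pos h2]
      · rw [if_neg h2, if_neg h2]
        rw [PySem.Int.mod_eq_emod_of_pos (by omega : (0:Int) < 2),
          PySem.Int.floordiv_eq_ediv_of_pos (by omega : (0:Int) < 2)]
        by_cases h3 : k % 2 = 0
        · rw [if_pos h3, if_pos h3, ih (k / 2) (by split_ifs at h ⊢ <;> omega)]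
        · rw [if_neg h3, if_neg h3, ih (k - 1) (by split_ifs at h ⊢ <;> omega),
            ih (k + 1) (by split_ifs at h ⊢ <;> omega)]

-- Abstract (proof-only) versions of A's loops: the queue is one plain list, the
-- visited set a PySem.Set; port A is bridged to these, these to a level-synchronous
-- BFS (runBL), whose answer is then shown to be the graph distance.
def procAL (K : Int) (time : Int) :
    List Int → List (Int × Int) → PySem.Set Int → (List (Int × Int) × PySem.Set Int) ⊕ Int
  | [], q, v => Sum.inl (q, v)
  | n :: rest, q, v =>
    if n < 0 then procAL K time rest q v
    else if PySem.Set.contains v n then procAL K time rest q v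
    else if n = K then Sum.inr (time + 1)
    else procAL K time rest (q ++ [(n, time + 1)]) (PySem.Set.add v n)

def runAL (K : Int) : Nat → List (Int × Int) → PySem.Set Int → Option Int
  | 0, _, _ => none
  | _ + 1, [], _ => none
  | fuel + 1, (cur, time) :: q, v =>
    match procAL K time (if cur > K then [cur - 1] else [cur + 1, cur - 1, cur * 2]) q v with
    | Sum.inl (q', v') => runAL K fuel q' v'
    | Sum.inr r => some r

-- Proof-only level-synchronous BFS: the queue BFS above is bridged to it (sim),
-- and its answer is then shown to be the graph distance.
def stepBL (K : Int) : List Int → List Int → PySem.Set Int → Option (List Int × PySem.Set Int)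
  | [], nxt, v => some (nxt, v)
  | y :: rest, nxt, v =>
    if y = K then none
    else if 0 ≤ y ∧ PySem.Set.contains v y = false then
      stepBL K rest (nxt ++ [y]) (PySem.Set.add v y)
    else stepBL K rest nxt v

def expandBL (K : Int) : List Int → List Int → PySem.Set Int → Option (List Int × PySem.Set Int)
  | [], nxt, v => some (nxt, v)
  | x :: rest, nxt, v =>
    match stepBL K (if x > K then [x - 1] else [x + 1, x - 1, x * 2]) nxt v with
    | none => none
    | some (nxt', v') => expandBL K rest nxt' v'

def runBL (K : Int) : Nat → List Int → Int → PySem.Set Int → Option Int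
  | 0, _, _, _ => none
  | _ + 1, [], _, _ => none
  | fuel + 1, x :: F, t, v =>
    match expandBL K (x :: F) [] v with
    | none => some (t + 1)
    | some (F', v') => runBL K fuel F' (t + 1) v'

-- the neighbour list of A's search graph (before the nonnegativity filter)
def LP (K x : Int) : List Int := if x > K then [x - 1] else [x + 1, x - 1, x * 2]

-- reachability in exactly t steps in A's (pruned) search graph
inductive reachP (N K : Int) : Nat → Int → Prop
  | base : reachP N K 0 N
  | step {t x y} : reachP N K t x → y ∈ LP K x → 0 ≤ y → reachP N K (t + 1) y

-- reachability in exactly t steps in the unpruned graph (moves ±1 and ×2, targets ≥ 0)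
inductive reachU (N : Int) : Nat → Int → Prop
  | base : reachU N 0 N
  | step {t x y} : reachU N t x → (y = x + 1 ∨ y = x - 1 ∨ y = 2 * x) → 0 ≤ y →
      reachU N (t + 1) y

noncomputable def dP (N K x : Int) : Nat := sInf {t | reachP N K t x}
noncomputable def dU (N x : Int) : Nat := sInf {t | reachU N t x}

-- ---------- placeholder master lemmas (filled below) ----------

-- ---------- bridges: the HashSet/two-list port A = the abstract list version ----------

-- A's inner-loop bridge: consing onto the back list is appending to the queue
lemma procA_bridge (K time : Int) :
    ∀ (ys : List Int) (front back : List (Int × Int)) (v : Std.HashSet Int) (s : PySem.Set Int),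
      (∀ x : Int, x ∈ v ↔ x ∈ s) →
      (∃ r, procA K time ys back v = Sum.inr r ∧
        procAL K time ys (front ++ back.reverse) s = Sum.inr r) ∨
      (∃ back' v' s', procA K time ys back v = Sum.inl (back', v') ∧
        procAL K time ys (front ++ back.reverse) s = Sum.inl (front ++ back'.reverse, s') ∧
        (∀ x : Int, x ∈ v' ↔ x ∈ s')) := by
  intro ys
  induction ys with
  | nil =>
    intro front back v s hR
    exact Or.inr ⟨back, v, s, by simp [procA], by simp [procAL], hR⟩
  | cons n rest ih =>
    intro front back v s hR
    have hcontains : v.contains n = PySem.Set.contains s n := by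
      by_cases hn : n ∈ s
      · have h1 : v.contains n = true := by
          rw [Std.HashSet.contains_iff_mem]; exact (hR n).2 hn
        rw [h1, (PySem.Set.contains_iff s n).2 hn]
      · have h1 : v.contains n = false := by
          rw [Bool.eq_false_iff, Ne, Std.HashSet.contains_iff_mem]
          exact fun h => hn ((hR n).1 h)
        have h2 : PySem.Set.contains s n = false := by
          rw [Bool.eq_false_iff, Ne, PySem.Set.contains_iff]
          exact hn
        rw [h1, h2]
    by_cases hneg : n < 0
    · have e1 : procA K time (n :: rest) back v = procA K time rest back v := by
        simp only [procA, if_pos hneg]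
      have e2 : procAL K time (n :: rest) (front ++ back.reverse) s =
          procAL K time rest (front ++ back.reverse) s := by
        simp only [procAL, if_pos hneg]
      rw [e1, e2]; exact ih front back v s hR
    · by_cases hmem : PySem.Set.contains s n
      · have hv : v.contains n = true := by rw [hcontains]; exact hmem
        have e1 : procA K time (n :: rest) back v = procA K time rest back v := by
          simp only [procA, if_neg hneg, if_pos hv]
        have e2 : procAL K time (n :: rest) (front ++ back.reverse) s =
            procAL K time rest (front ++ back.reverse) s := by
          simp only [procAL, if_neg hneg, if_pos hmem]
        rw [e1, e2]; exact ih front back v s hR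
      · have hv : v.contains n = false := by
          rw [hcontains]; simpa using hmem
        have hmf : PySem.Set.contains s n = false := by simpa using hmem
        by_cases hnK : n = K
        · refine Or.inl ⟨time + 1, ?_, ?_⟩
          · simp only [procA, if_neg hneg, hv, Bool.false_eq_true, if_false, if_pos hnK]
          · simp only [procAL, if_neg hneg, hmf, Bool.false_eq_true, if_false, if_pos hnK]
        · have e1 : procA K time (n :: rest) back v =
              procA K time rest ((n, time + 1) :: back) (v.insert n) := by
            simp only [procA, if_neg hneg, hv, Bool.false_eq_true, if_false, if_neg hnK]
          have e2 : procAL K time (n :: rest) (front ++ back.reverse) s =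
              procAL K time rest ((front ++ back.reverse) ++ [(n, time + 1)])
                (PySem.Set.add s n) := by
            simp only [procAL, if_neg hneg, hmf, Bool.false_eq_true, if_false, if_neg hnK]
          have hq : (front ++ back.reverse) ++ [(n, time + 1)] =
              front ++ ((n, time + 1) :: back).reverse := by simp
          have hR' : ∀ x : Int, x ∈ v.insert n ↔ x ∈ PySem.Set.add s n := by
            intro x
            rw [Std.HashSet.mem_insert, PySem.Set.mem_add]
            constructor
            · rintro (h | h)
              · right; exact (beq_iff_eq.1 h).symm
              · left; exact (hR x).1 h
            · rintro (h | h)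
              · right; exact (hR x).2 h
              · left; exact beq_iff_eq.2 h.symm
          rw [e1, e2, hq]
          exact ih front ((n, time + 1) :: back) (v.insert n) (PySem.Set.add s n) hR'

-- A's outer-loop bridge: the two-list queue is the plain-list queue
lemma runA_bridge (K : Int) :
    ∀ (fuel : Nat) (front back : List (Int × Int)) (v : Std.HashSet Int) (s : PySem.Set Int),
      (∀ x : Int, x ∈ v ↔ x ∈ s) →
      runA K fuel front back v = runAL K fuel (front ++ back.reverse) s := by
  intro fuel
  induction fuel with
  | zero => intro front back v s _; rfl
  | succ fuel ih =>
    intro front back v s hR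
    rcases front with _ | ⟨⟨cur, time⟩, q⟩
    · rcases hb : back.reverse with _ | ⟨⟨cur, time⟩, q⟩
      · simp [runA, runAL, hb]
      · rcases procA_bridge K time (if cur > K then [cur - 1] else [cur + 1, cur - 1, cur * 2])
            q [] v s hR with ⟨r, h1, h2⟩ | ⟨back', v', s', h1, h2, hR'⟩
        · simp only [List.reverse_nil, List.append_nil] at h2
          simp only [runA, runAL, hb, h1, h2, List.nil_append]
        · simp only [List.reverse_nil, List.append_nil] at h2
          simp only [runA, runAL, hb, h1, h2, List.nil_append]
          exact ih q back' v' s' hR'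
    · rcases procA_bridge K time (if cur > K then [cur - 1] else [cur + 1, cur - 1, cur * 2])
          q back v s hR with ⟨r, h1, h2⟩ | ⟨back', v', s', h1, h2, hR'⟩
      · simp only [List.cons_append] at h2 ⊢
        simp [runA, runAL, h1, h2]
      · simp only [List.cons_append] at h2 ⊢
        simp only [runA, runAL, h1, h2]
        exact ih q back' v' s' hR'

-- the initial HashSet {N} has the same members as the PySem.Set [N]
lemma init_set_mem (N : Int) :
    ∀ x : Int, x ∈ (∅ : Std.HashSet Int).insert N ↔ x ∈ ([N] : PySem.Set Int) := by
  intro x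
  rw [Std.HashSet.mem_insert]
  simp only [Std.HashSet.not_mem_empty, or_false, beq_iff_eq, List.mem_singleton]
  exact eq_comm

-- ---------- the abstract equivalence: queue BFS = level BFS ----------

-- B's inner loop only appends: the new frontier part and visited part coincide
lemma stepBL_some (K : Int) :
    ∀ (ys nxt : List Int) (v : PySem.Set Int) (nxt' : List Int) (v' : PySem.Set Int),
      stepBL K ys nxt v = some (nxt', v') →
      ∃ new : List Int, nxt' = nxt ++ new ∧ v' = v ++ new ∧
        (∀ y ∈ new, 0 ≤ y ∧ y ≠ K ∧ y ∈ ys) ∧ (v.Nodup → v'.Nodup) := by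
  intro ys
  induction ys with
  | nil =>
    intro nxt v nxt' v' h
    simp [stepBL] at h
    exact ⟨[], by simp [h.1], by simp [h.2], by simp, fun hn => h.2 ▸ hn⟩
  | cons y rest ih =>
    intro nxt v nxt' v' h
    by_cases hyK : y = K
    · simp [stepBL, hyK] at h
    · by_cases hc : 0 ≤ y ∧ PySem.Set.contains v y = false
      · simp only [stepBL, if_neg hyK, if_pos hc] at h
        have hyv : y ∉ v := by simpa using hc.2
        have hadd : PySem.Set.add v y = v ++ [y] := PySem.Set.add_of_not_mem hyv
        obtain ⟨new, h1, h2, h3, h4⟩ := ih (nxt ++ [y]) (PySem.Set.add v y) nxt' v' h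
        refine ⟨y :: new, by simp [h1], by simp [h2, hadd], ?_, ?_⟩
        · intro z hz
          rcases List.mem_cons.1 hz with rfl | hz
          · exact ⟨hc.1, hyK, by simp⟩
          · obtain ⟨a, b, c⟩ := h3 z hz
            exact ⟨a, b, by simp [c]⟩
        · intro hnd
          apply h4
          rw [hadd]
          exact List.Nodup.append hnd (List.nodup_singleton y) (by simpa using hyv)
      · simp only [stepBL, if_neg hyK, if_neg hc] at h
        obtain ⟨new, h1, h2, h3, h4⟩ := ih nxt v nxt' v' h
        refine ⟨new, h1, h2, ?_, h4⟩
        intro z hz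
        obtain ⟨a, b, c⟩ := h3 z hz
        exact ⟨a, b, by simp [c]⟩

-- A's inner loop over the same neighbour list is B's inner loop, with the queue's
-- time-(t+1) tail as accumulator
lemma procAL_stepBL (K t : Int) (hK : 0 ≤ K) :
    ∀ (ys : List Int) (Fq : List (Int × Int)) (nxt : List Int) (v : PySem.Set Int),
      K ∉ v →
      procAL K t ys (Fq ++ nxt.map (fun y => (y, t + 1))) v =
        (match stepBL K ys nxt v with
         | some (nxt', v') => Sum.inl (Fq ++ nxt'.map (fun y => (y, t + 1)), v')
         | none => Sum.inr (t + 1)) := by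
  intro ys
  induction ys with
  | nil => intro Fq nxt v _; simp [procAL, stepBL]
  | cons y rest ih =>
    intro Fq nxt v hKv
    by_cases hyneg : y < 0
    · have hyK : ¬ y = K := by omega
      have hcond : ¬ (0 ≤ y ∧ PySem.Set.contains v y = false) := by
        intro h; omega
      simp only [procAL, if_pos hyneg, stepBL, if_neg hyK, if_neg hcond]
      exact ih Fq nxt v hKv
    · by_cases hyv : PySem.Set.contains v y
      · have hyK : ¬ y = K := by
          intro h; subst h
          exact hKv ((PySem.Set.contains_iff v y).1 hyv)
        have hcond : ¬ (0 ≤ y ∧ PySem.Set.contains v y = false) := by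
          intro h; rw [hyv] at h; exact absurd h.2 (by simp)
        simp only [procAL, if_neg hyneg, if_pos hyv, stepBL, if_neg hyK, if_neg hcond]
        exact ih Fq nxt v hKv
      · by_cases hyK : y = K
        · simp only [procAL, if_neg hyneg, if_neg hyv, stepBL, if_pos hyK]
        · have hcf : PySem.Set.contains v y = false := by
            simpa using hyv
          have hcond : 0 ≤ y ∧ PySem.Set.contains v y = false := ⟨by omega, hcf⟩
          simp only [procAL, if_neg hyneg, if_neg hyv, if_neg hyK, stepBL, if_pos hcond]
          have hq : (Fq ++ nxt.map (fun y => (y, t + 1))) ++ [(y, t + 1)] =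
              Fq ++ (nxt ++ [y]).map (fun y => (y, t + 1)) := by
            simp
          rw [hq]
          have hKv' : K ∉ PySem.Set.add v y := by
            intro h
            rcases (PySem.Set.mem_add v y K).1 h with h | h
            · exact hKv h
            · exact hyK h.symm
          exact ih Fq (nxt ++ [y]) (PySem.Set.add v y) hKv'

-- B's level expansion only appends new, nonnegative, bounded, non-K nodes
lemma expandBL_some (K : Int) (hK : 0 ≤ K) :
    ∀ (F nxt : List Int) (v : PySem.Set Int) (F' : List Int) (v' : PySem.Set Int),
      (∀ x ∈ F, -1 ≤ x ∧ x ≤ 2 * K + 1) →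
      expandBL K F nxt v = some (F', v') →
      ∃ new : List Int, F' = nxt ++ new ∧ v' = v ++ new ∧
        (∀ y ∈ new, 0 ≤ y ∧ y ≤ 2 * K + 1 ∧ y ≠ K) ∧ (v.Nodup → v'.Nodup) := by
  intro F
  induction F with
  | nil =>
    intro nxt v F' v' _ h
    simp [expandBL] at h
    exact ⟨[], by simp [h.1], by simp [h.2], by simp, fun hn => h.2 ▸ hn⟩
  | cons x rest ih =>
    intro nxt v F' v' hF h
    simp only [expandBL] at h
    rcases hs : stepBL K (if x > K then [x - 1] else [x + 1, x - 1, x * 2]) nxt v with _ | ⟨nxt1, v1⟩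
    · rw [hs] at h; simp at h
    · rw [hs] at h; simp only [] at h
      obtain ⟨new1, e1, e2, e3, e4⟩ := stepBL_some K _ nxt v nxt1 v1 hs
      obtain ⟨new2, f1, f2, f3, f4⟩ :=
        ih nxt1 v1 F' v' (fun z hz => hF z (List.mem_cons_of_mem x hz)) h
      refine ⟨new1 ++ new2, by simp [f1, e1], by simp [f2, e2], ?_, fun hn => f4 (e4 hn)⟩
      intro y hy
      rcases List.mem_append.1 hy with hy | hy
      · obtain ⟨a, b, c⟩ := e3 y hy
        have hx := hF x (by simp)
        refine ⟨a, ?_, b⟩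
        by_cases hxK : x > K
        · simp [if_pos hxK] at c
          omega
        · simp [if_neg hxK] at c
          rcases c with rfl | rfl | rfl <;> omega
      · obtain ⟨a, b, c⟩ := f3 y hy
        exact ⟨a, b, c⟩

-- one whole BFS level of A, driven through B's level expansion
lemma runAL_level (K t : Int) (hK : 0 ≤ K) :
    ∀ (F nxt : List Int) (v : PySem.Set Int) (fuelRest : Nat),
      K ∉ v →
      runAL K (F.length + fuelRest)
        (F.map (fun y => (y, t)) ++ nxt.map (fun y => (y, t + 1))) v =
        (match expandBL K F nxt v with
         | none => some (t + 1)
         | some (F', v') => runAL K fuelRest (F'.map (fun y => (y, t + 1))) v') := by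
  intro F
  induction F with
  | nil => intro nxt v fuelRest _; simp [expandBL]
  | cons x rest ih =>
    intro nxt v fuelRest hKv
    have hlen : (x :: rest).length + fuelRest = (rest.length + fuelRest) + 1 := by
      simp [Nat.succ_add]
    rw [hlen]
    have hcons : (x :: rest).map (fun y => (y, t)) ++ nxt.map (fun y => (y, t + 1)) =
        (x, t) :: (rest.map (fun y => (y, t)) ++ nxt.map (fun y => (y, t + 1))) := by
      simp
    rw [hcons]
    simp only [runAL]
    rw [procAL_stepBL K t hK _ (rest.map (fun y => (y, t))) nxt v hKv]
    rcases hs : stepBL K (if x > K then [x - 1] else [x + 1, x - 1, x * 2]) nxt v with _ | ⟨nxt1, v1⟩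
    · simp only [expandBL, hs]
    · simp only [expandBL, hs]
      obtain ⟨new1, _, e2, e3, _⟩ := stepBL_some K _ nxt v nxt1 v1 hs
      have hKv1 : K ∉ v1 := by
        rw [e2]
        intro h
        rcases List.mem_append.1 h with h | h
        · exact hKv h
        · exact (e3 K h).2.1 rfl
      exact ih nxt1 v1 fuelRest hKv1

-- a Nodup list of ints inside [-1, 2K+1] has at most 2K+3 elements
lemma length_le_of_nodup_range (K : Int) (hK : 0 ≤ K) (v : List Int)
    (hnd : v.Nodup) (hr : ∀ x ∈ v, -1 ≤ x ∧ x ≤ 2 * K + 1) :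
    (v.length : Int) ≤ 2 * K + 3 := by
  have hsub : v.toFinset ⊆ Finset.Icc (-1) (2 * K + 1) := by
    intro x hx
    rcases hr x (List.mem_toFinset.1 hx) with ⟨h1, h2⟩
    exact Finset.mem_Icc.2 ⟨h1, h2⟩
  have hcard := Finset.card_le_card hsub
  rw [List.toFinset_card_of_nodup hnd, Int.card_Icc] at hcard
  have : ((2 * K + 1 + 1 - -1).toNat : Int) = 2 * K + 3 := by omega
  omega

-- the main simulation: queue BFS (A) = level BFS, given enough fuel on both sides
lemma sim (K : Int) (hK : 0 ≤ K) :
    ∀ (fB : Nat) (F : List Int) (t : Int) (v : PySem.Set Int) (fA : Nat),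
      v.Nodup → (∀ x ∈ v, -1 ≤ x ∧ x ≤ 2 * K + 1) → (∀ x ∈ F, x ∈ v) → K ∉ v →
      2 * K + 4 - v.length ≤ (fB : Int) →
      (F.length : Int) + (2 * K + 3 - v.length) + fB ≤ (fA : Int) →
      runAL K fA (F.map (fun y => (y, t))) v = runBL K fB F t v := by
  intro fB
  induction fB with
  | zero =>
    intro F t v fA hnd hr _ _ hfB _
    have := length_le_of_nodup_range K hK v hnd hr
    simp at hfB
    omega
  | succ fB ih =>
    intro F t v fA hnd hr hFv hKv hfB hfA
    rcases F with _ | ⟨x, F0⟩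
    · simp only [List.map_nil]
      cases fA <;> rfl
    · have hvlen := length_le_of_nodup_range K hK v hnd hr
      have hle : (x :: F0).length ≤ fA := by
        have : (0 : Int) ≤ 2 * K + 3 - v.length := by omega
        have : ((x :: F0).length : Int) ≤ (fA : Int) := by push_cast at hfA ⊢; omega
        exact_mod_cast this
      obtain ⟨rest, hrest⟩ := Nat.exists_eq_add_of_le hle
      rw [hrest]
      have hmap : (x :: F0).map (fun y => (y, t)) =
          (x :: F0).map (fun y => (y, t)) ++ ([] : List Int).map (fun y => (y, t + 1)) := by
        simp
      rw [hmap, runAL_level K t hK (x :: F0) [] v rest hKv]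
      rcases he : expandBL K (x :: F0) [] v with _ | ⟨F', v'⟩
      · simp only [runBL, he]
      · simp only [runBL, he]
        obtain ⟨new, g1, g2, g3, g4⟩ :=
          expandBL_some K hK (x :: F0) [] v F' v' (fun z hz => (hr z (hFv z hz))) he
        simp only [List.nil_append] at g1
        subst g1
        rcases F' with _ | ⟨w, new0⟩
        · cases rest <;> cases fB <;> simp [runAL, runBL, List.map_nil]
        · apply ih (w :: new0) (t + 1) v' rest
          · exact g4 hnd
          · intro z hz
            rw [g2] at hz
            rcases List.mem_append.1 hz with hz | hz
            · exact hr z hz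
            · rcases g3 z hz with ⟨a, b, _⟩; omega
          · intro z hz; rw [g2]; exact List.mem_append.2 (Or.inr hz)
          · rw [g2]
            intro h
            rcases List.mem_append.1 h with h | h
            · exact hKv h
            · exact (g3 K h).2.2 rfl
          · have hv' : (v'.length : Int) = v.length + (w :: new0).length := by
              rw [g2]; push_cast [List.length_append]; ring
            have : (1 : Int) ≤ (w :: new0).length := by
              push_cast [List.length_cons]; omega
            push_cast at hfB ⊢
            omega
          · have hv' : (v'.length : Int) = v.length + (w :: new0).length := by
              rw [g2]; push_cast [List.length_append]; ring
            have hfa' : ((x :: F0).length : Int) + rest = fA := by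
              rw [hrest]; push_cast; ring
            push_cast at hfA ⊢
            omega

-- K < N: A's BFS degenerates to a chain of -1 moves
lemma runAL_chain (K : Int) (hK : 0 ≤ K) :
    ∀ (j : Nat) (t : Int) (v : PySem.Set Int) (fuel : Nat),
      1 ≤ j → j ≤ fuel → (∀ z ∈ v, K + j ≤ z) →
      runAL K fuel [(K + j, t)] v = some (t + j) := by
  intro j
  induction j with
  | zero => intro t v fuel h; omega
  | succ j ih =>
    intro t v fuel _ hfuel hv
    obtain ⟨fuel0, rfl⟩ : ∃ f, fuel = f + 1 := ⟨fuel - 1, by omega⟩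
    have hgt : (K + (j + 1 : Nat) : Int) > K := by push_cast; omega
    have hKnv : PySem.Set.contains v (K + (j + 1 : Nat) - 1) = false := by
      have : (K + (j + 1 : Nat) - 1 : Int) ∉ v := by
        intro h
        have := hv _ h
        push_cast at this ⊢
        omega
      simpa using fun h => this ((PySem.Set.contains_iff v _).1 h)
    rcases Nat.eq_or_lt_of_le (show 1 ≤ j + 1 by omega) with h1 | h1
    · have hj : j = 0 := by omega
      subst hj
      have hchild : (K + ((0 : Nat) + 1 : Nat) - 1 : Int) = K := by push_cast; ring
      simp only [runAL, if_pos hgt, procAL]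
      rw [if_neg (by push_cast; omega : ¬ (K + ((0:Nat) + 1 : Nat) : Int) - 1 < 0)]
      rw [hKnv]
      simp only [Bool.false_eq_true, if_false]
      rw [if_pos hchild]
      show some (t + 1) = some (t + ((0 : Nat) + 1 : Nat))
      norm_num
    · have hj1 : 1 ≤ j := by omega
      have hchild_ne : ¬ (K + (j + 1 : Nat) - 1 : Int) = K := by push_cast; omega
      have hpos : ¬ (K + (j + 1 : Nat) - 1 : Int) < 0 := by push_cast; omega
      simp only [runAL, if_pos hgt, procAL]
      rw [if_neg hpos, hKnv]
      simp only [Bool.false_eq_true, if_false]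
      rw [if_neg hchild_ne]
      simp only [List.nil_append]
      have heq : (K + (j + 1 : Nat) - 1 : Int) = K + (j : Nat) := by push_cast; ring
      rw [heq]
      have := ih (t + 1) (PySem.Set.add v (K + (j : Nat))) fuel0 hj1 (by omega)
        (by
          intro z hz
          rcases (PySem.Set.mem_add v _ z).1 hz with h | h
          · have := hv z h; push_cast at this ⊢; omega
          · subst h; omega)
      rw [this]
      congr 1
      push_cast
      ring

-- ---------- basic facts about reachability and distances ----------

lemma reachP_zero {N K x : Int} (h : reachP N K 0 x) : x = N := by
  cases h; rfl

lemma reachU_zero {N x : Int} (h : reachU N 0 x) : x = N := by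
  cases h; rfl

lemma reachP_succ {N K : Int} {t : Nat} {y : Int} (h : reachP N K (t + 1) y) :
    ∃ x, reachP N K t x ∧ y ∈ LP K x ∧ 0 ≤ y := by
  cases h with
  | step hx hm hy => exact ⟨_, hx, hm, hy⟩

lemma reachU_succ {N : Int} {t : Nat} {y : Int} (h : reachU N (t + 1) y) :
    ∃ x, reachU N t x ∧ (y = x + 1 ∨ y = x - 1 ∨ y = 2 * x) ∧ 0 ≤ y := by
  cases h with
  | step hx hm hy => exact ⟨_, hx, hm, hy⟩

lemma reachP_reachU {N K : Int} {t : Nat} {x : Int} (h : reachP N K t x) : reachU N t x := by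
  induction h with
  | base => exact reachU.base
  | step _ hm hy ih =>
    refine reachU.step ih ?_ hy
    unfold LP at hm
    split_ifs at hm <;> simp at hm <;> omega

lemma dP_le {N K x : Int} {t : Nat} (h : reachP N K t x) : dP N K x ≤ t :=
  Nat.sInf_le h

lemma dU_le {N x : Int} {t : Nat} (h : reachU N t x) : dU N x ≤ t :=
  Nat.sInf_le h

lemma reachP_dP {N K x : Int} (h : ∃ t, reachP N K t x) : reachP N K (dP N K x) x :=
  Nat.sInf_mem h

lemma reachU_dU {N x : Int} (h : ∃ t, reachU N t x) : reachU N (dU N x) x :=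
  Nat.sInf_mem h

-- decrement chains exist in the pruned graph
lemma reachP_decr (N K : Int) :
    ∀ (j : Nat), 0 ≤ N - j → reachP N K j (N - j) := by
  intro j
  induction j with
  | zero => intro _; simpa using reachP.base
  | succ j ih =>
    intro h
    have hj : (0 : Int) ≤ N - j := by push_cast at h ⊢; omega
    have : reachP N K j (N - j) := ih hj
    have hm : N - (j + 1 : Nat) ∈ LP K (N - j) := by
      unfold LP
      split_ifs <;> push_cast <;> simp <;> omega
    exact (by push_cast at h ⊢; exact reachP.step this hm h)

-- increment chains exist in the pruned graph as long as they stay ≤ K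
lemma reachP_incr (N K : Int) (hN : -1 ≤ N) :
    ∀ (j : Nat), N + j ≤ K + 1 → reachP N K j (N + j) := by
  intro j
  induction j with
  | zero => intro _; simpa using reachP.base
  | succ j ih =>
    intro h
    have hj : N + (j : Int) ≤ K := by push_cast at h ⊢; omega
    have hx : reachP N K j (N + j) := ih (by omega)
    have hm : N + (j + 1 : Nat) ∈ LP K (N + j) := by
      unfold LP
      rw [if_neg (by omega)]
      simp
      left; ring
    refine reachP.step hx hm (by push_cast; omega)

lemma reachU_of_nonneg (N : Int) (hN : -1 ≤ N) (k : Int) (hk : 0 ≤ k) :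
    ∃ t, reachU N t k := by
  rcases le_or_gt k N with h | h
  · refine ⟨(N - k).toNat, ?_⟩
    have := reachP_reachU (reachP_decr N (k-1) (N - k).toNat (by omega))
    have he : N - ((N - k).toNat : Int) = k := by omega
    rwa [he] at this
  · refine ⟨(k - N).toNat, ?_⟩
    have := reachP_reachU (reachP_incr N k hN (k - N).toNat (by omega))
    have he : N + ((k - N).toNat : Int) = k := by omega
    rwa [he] at this

lemma reachP_K (N K : Int) (hN : -1 ≤ N) (hK : N < K) : ∃ t, reachP N K t K := by
  refine ⟨(K - N).toNat, ?_⟩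
  have := reachP_incr N K hN (K - N).toNat (by omega)
  have he : N + ((K - N).toNat : Int) = K := by omega
  rwa [he] at this

-- positions can drop by at most one per step
lemma reachU_lower {N : Int} : ∀ {t : Nat} {x : Int}, reachU N t x → N - t ≤ x := by
  intro t x h
  induction h with
  | base => simp
  | step hx hm hy ih => push_cast at ih ⊢; omega

-- a single ±1 move, Lipschitz bound for dU
lemma dU_adj (N : Int) (a b : Int) (hb : 0 ≤ b) (hab : b = a + 1 ∨ b = a - 1)
    (ha : ∃ t, reachU N t a) : dU N b ≤ dU N a + 1 := by
  have h := reachU_dU ha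
  exact dU_le (reachU.step h (by omega) hb)

-- ---------- lower-bound lemmas for dU (the recursion is a lower bound) ----------

-- the base cases: reaching 0 or 1 from N ∈ {-1, 0} costs at least k - N steps
lemma reachU_base01 (N : Int) (hN : -1 ≤ N) (hN0 : N ≤ 0) :
    ∀ (t : Nat) (k : Int), (k = 0 ∨ k = 1) → N < k → reachU N t k → (k - N : Int) ≤ t := by
  intro t
  induction t with
  | zero => intro k _ hNk h; have := reachU_zero h; omega
  | succ t ih =>
    intro k hk hNk h
    obtain ⟨x, hx, hm, _⟩ := reachU_succ h
    rcases hk with rfl | rfl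
    · -- k = 0, so N = -1; x ∈ {-1, 1, 0}
      have hN' : N = -1 := by omega
      have hx0 : x = -1 ∨ x = 1 ∨ x = 0 := by omega
      rcases hx0 with hx0 | hx0 | hx0
      · -- x = -1 < 0 is only the start: t = 0
        rcases Nat.eq_zero_or_pos t with ht | ht
        · omega
        · obtain ⟨t', rfl⟩ := Nat.exists_eq_succ_of_ne_zero (Nat.pos_iff_ne_zero.1 ht)
          obtain ⟨y, hy, hmy, hy0⟩ := reachU_succ hx
          omega
      · have := ih 1 (Or.inr rfl) (by omega) (hx0 ▸ hx)
        omega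
      · have := ih 0 (Or.inl rfl) (by omega) (hx0 ▸ hx)
        omega
    · -- k = 1; x ∈ {0, 2}
      have hx1 : x = 0 ∨ x = 2 := by omega
      rcases hx1 with hx0 | hx0
      · by_cases hN' : N = 0
        · omega
        · have := ih 0 (Or.inl rfl) (by omega) (hx0 ▸ hx)
          omega
      · -- x = 2 ≠ N, so t ≥ 1, hence t + 1 ≥ 2 ≥ 1 - N
        rcases Nat.eq_zero_or_pos t with ht | ht
        · subst ht; have := reachU_zero hx; omega
        · omega

-- last move into an odd target is ±1
lemma dU_odd_ge (N k : Int) (hodd : k % 2 = 1) (hNk : N < k)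
    (hreach : ∃ t, reachU N t k) :
    1 + min (dU N (k - 1)) (dU N (k + 1)) ≤ dU N k := by
  have h := reachU_dU hreach
  rcases ht : dU N k with _ | t
  · rw [ht] at h; have := reachU_zero h; omega
  · rw [ht] at h
    obtain ⟨x, hx, hm, _⟩ := reachU_succ h
    have : x = k - 1 ∨ x = k + 1 := by omega
    rcases this with rfl | rfl
    · have := dU_le hx; omega
    · have := dU_le hx; omega

-- the key structural lemma (lower bound for even targets): any way to reach an even
-- k > N in t steps costs at least min(k - N, 1 + dU(k/2))
lemma dU_even_ge_aux (N : Int) (hN : -1 ≤ N) :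
    ∀ (t : Nat), ∀ (k : Int), 2 ≤ k → k % 2 = 0 → N < k → reachU N t k →
      min (k - N) (1 + (dU N (k / 2) : Int)) ≤ (t : Int) := by
  intro t
  induction t using Nat.strong_induction_on with
  | _ t IH =>
    intro k h2 heven hNk h
    rcases t with _ | t
    · have := reachU_zero h; omega
    · obtain ⟨x, hx, hm, _⟩ := reachU_succ h
      by_cases hdbl : k = 2 * x
      · -- last move doubles: x = k / 2
        have hx2 : x = k / 2 := by omega
        subst hx2
        have := dU_le hx
        have h' : (dU N (k / 2) : Int) ≤ (t : Int) := by exact_mod_cast this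
        omega
      · -- last move is ±1 into even k: x odd
        have hxpm : x = k - 1 ∨ x = k + 1 := by omega
        rcases t with _ | t'
        · -- x = N: k = N + 1 (since N < k)
          have hxN := reachU_zero hx
          omega
        · obtain ⟨y, hy, hmy, hy0⟩ := reachU_succ hx
          have hxodd : x % 2 = 1 := by omega
          have hypm : y = x - 1 ∨ y = x + 1 := by
            rcases hmy with h' | h' | h' <;> omega
          have hyk : y = k - 2 ∨ y = k ∨ y = k + 2 := by omega
          rcases hyk with hyk | hyk | hyk
          · -- y = k - 2
            by_cases hyN : y ≤ N
            · -- k - N ≤ 2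
              have : k - N ≤ 2 := by omega
              simp only [min_le_iff]
              left; push_cast; omega
            · by_cases hy2 : 2 ≤ y
              · have hIH := IH t' (by omega) y (by omega) (by omega) (by omega) (hyk ▸ hy)
                rcases min_le_iff.1 hIH with hc | hc
                · simp only [min_le_iff]; left; push_cast at hc ⊢; omega
                · -- dU(k/2) ≤ dU(y/2) + 1
                  have hadj : dU N (k / 2) ≤ dU N (y / 2) + 1 := by
                    apply dU_adj N (y / 2) (k / 2) (by omega) (by omega)
                    exact reachU_of_nonneg N hN (y / 2) (by omega)
                  simp only [min_le_iff]; right; push_cast at hc ⊢; omega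
              · -- y = 0 (even, ≥ 0, < 2), so k = 2 and N = -1
                have hy0' : y = 0 := by omega
                have hk2 : k = 2 := by omega
                have hdu0 : dU N 0 ≤ t' := dU_le (hy0' ▸ hyk ▸ hy)
                have hadj : dU N 1 ≤ dU N 0 + 1 := by
                  apply dU_adj N 0 1 (by omega) (by omega)
                  exact reachU_of_nonneg N hN 0 (by omega)
                have : (k / 2 : Int) = 1 := by omega
                rw [this]
                simp only [min_le_iff]; right; push_cast; omega
          · -- y = k, reached two steps earlier
            have hIH := IH t' (by omega) k h2 heven hNk (hyk ▸ hy)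
            push_cast at hIH ⊢; omega
          · -- y = k + 2
            by_cases hyN : y ≤ N
            · omega
            · have hIH := IH t' (by omega) y (by omega) (by omega) (by omega) (hyk ▸ hy)
              rcases min_le_iff.1 hIH with hc | hc
              · simp only [min_le_iff]; left; push_cast at hc ⊢; omega
              · have hadj : dU N (k / 2) ≤ dU N (y / 2) + 1 := by
                  apply dU_adj N (y / 2) (k / 2) (by omega) (by omega)
                  exact reachU_of_nonneg N hN (y / 2) (by omega)
                simp only [min_le_iff]; right; push_cast at hc ⊢; omega

-- decrement lower bound: dU of a point below N
lemma dU_below (N : Int) (hN : -1 ≤ N) (k : Int) (hk : 0 ≤ k) :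
    (N - k : Int) ≤ (dU N k : Int) := by
  have h := reachU_dU (reachU_of_nonneg N hN k hk)
  have := reachU_lower h
  omega

-- fB is a lower bound for the unpruned distance
lemma fB_le_dU (N : Int) (hN : -1 ≤ N) :
    ∀ k, 0 ≤ k → fB N k ≤ (dU N k : Int) := by
  intro k
  induction k using fB.induct N with
  | case1 k hkN =>
    intro hk
    rw [fB, if_pos hkN]
    exact dU_below N hN k hk
  | case2 k hkN hk1 =>
    intro hk
    rw [fB, if_neg hkN, if_pos hk1]
    have hk01 : k = 0 ∨ k = 1 := by omega
    have := reachU_base01 N hN (by omega) (dU N k) k hk01 (by omega)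
      (reachU_dU (reachU_of_nonneg N hN k hk))
    omega
  | case3 k hkN hk1 heven ih =>
    intro hk
    rw [fB, if_neg hkN, if_neg hk1, if_pos heven]
    rw [PySem.Int.mod_eq_emod_of_pos (by omega)] at heven
    rw [PySem.Int.floordiv_eq_ediv_of_pos (by omega)] at ih ⊢
    have hS := dU_even_ge_aux N hN (dU N k) k (by omega) heven (by omega)
      (reachU_dU (reachU_of_nonneg N hN k hk))
    have hih := ih (by omega)
    calc min (k - N) (1 + fB N (k / 2))
        ≤ min (k - N) (1 + (dU N (k / 2) : Int)) := min_le_min le_rfl (by omega)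
      _ ≤ (dU N k : Int) := hS
  | case4 k hkN hk1 hodd ih1 ih2 =>
    intro hk
    rw [fB, if_neg hkN, if_neg hk1, if_neg hodd]
    rw [PySem.Int.mod_eq_emod_of_pos (by omega)] at hodd
    have hO := dU_odd_ge N k (by omega) (by omega)
      (reachU_of_nonneg N hN k hk)
    have h1 := ih1 (by omega)
    have h2 := ih2 (by omega)
    have hmin : min (fB N (k - 1)) (fB N (k + 1)) ≤
        (min (dU N (k - 1)) (dU N (k + 1)) : Int) := by
      exact min_le_min h1 h2
    push_cast at hO hmin ⊢
    omega

-- every j with 0 ≤ j ≤ K + 1 (or j ≤ N) is reachable in the pruned graph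
lemma reachP_exists (N K : Int) (hN : -1 ≤ N) (j : Int) (hj : 0 ≤ j)
    (hjK : j ≤ K + 1 ∨ j ≤ N) : ∃ t, reachP N K t j := by
  rcases le_or_gt j N with h | h
  · refine ⟨(N - j).toNat, ?_⟩
    have := reachP_decr N K (N - j).toNat (by omega)
    have he : N - ((N - j).toNat : Int) = j := by omega
    rwa [he] at this
  · refine ⟨(j - N).toNat, ?_⟩
    have := reachP_incr N K hN (j - N).toNat (by omega)
    have he : N + ((j - N).toNat : Int) = j := by omega
    rwa [he] at this

-- the recursion is an upper bound for the pruned distance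
lemma dP_le_fB (N K : Int) (hN : -1 ≤ N) (hK : 0 ≤ K) :
    ∀ k, 0 ≤ k → k ≤ K + 1 → (k % 2 = 1 → k ≤ K) → (dP N K k : Int) ≤ fB N k := by
  intro k
  induction k using fB.induct N with
  | case1 k hkN =>
    intro hk _ _
    rw [fB, if_pos hkN]
    have := dP_le (reachP_decr N K (N - k).toNat (by omega))
    have he : N - ((N - k).toNat : Int) = k := by omega
    rw [he] at this
    omega
  | case2 k hkN hk1 =>
    intro hk hk2 hk3
    rw [fB, if_neg hkN, if_pos hk1]
    have hk01 : k = 0 ∨ k = 1 := by omega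
    rcases hk01 with rfl | rfl
    · -- k = 0, N = -1: one step -1 → 0
      have hN1 : N = -1 := by omega
      have hm : (0 : Int) ∈ LP K N := by
        unfold LP
        rw [if_neg (by omega)]
        simp; omega
      have := dP_le (reachP.step reachP.base hm (by omega))
      omega
    · -- k = 1 ≤ K: increment chain
      have h1K : (1 : Int) ≤ K := hk3 (by omega)
      have := dP_le (reachP_incr N K hN (1 - N).toNat (by omega))
      have he : N + ((1 - N).toNat : Int) = 1 := by omega
      rw [he] at this
      omega
  | case3 k hkN hk1 heven ih =>
    intro hk hk2 _
    rw [fB, if_neg hkN, if_neg hk1, if_pos heven]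
    rw [PySem.Int.mod_eq_emod_of_pos (by omega)] at heven
    rw [PySem.Int.floordiv_eq_ediv_of_pos (by omega)] at ih ⊢
    have hK1 : 1 ≤ K := by omega
    have hhalf : k / 2 ≤ K := by omega
    have hih := ih (by omega) (by omega) (by omega)
    -- increment path of length k - N
    have hincr := dP_le (reachP_incr N K hN (k - N).toNat (by omega))
    have he : N + ((k - N).toNat : Int) = k := by omega
    rw [he] at hincr
    -- doubling edge (k/2) → k
    have hm : k ∈ LP K (k / 2) := by
      unfold LP
      rw [if_neg (by omega)]
      simp; omega
    have hx := reachP_dP (reachP_exists N K hN (k / 2) (by omega) (by omega))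
    have hdbl := dP_le (reachP.step hx hm (by omega))
    simp only [le_min_iff]
    constructor
    · omega
    · omega
  | case4 k hkN hk1 hodd ih1 ih2 =>
    intro hk hk2 hk3
    rw [fB, if_neg hkN, if_neg hk1, if_neg hodd]
    rw [PySem.Int.mod_eq_emod_of_pos (by omega)] at hodd
    have hkK : k ≤ K := hk3 (by omega)
    have h1 := ih1 (by omega) (by omega) (by omega)
    have h2 := ih2 (by omega) (by omega) (by omega)
    -- edge (k-1) → k
    have hm1 : k ∈ LP K (k - 1) := by
      unfold LP
      rw [if_neg (by omega)]
      simp only [List.mem_cons]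
      omega
    have hx1 := reachP_dP (reachP_exists N K hN (k - 1) (by omega) (by omega))
    have hd1 := dP_le (reachP.step hx1 hm1 (by omega))
    -- edge (k+1) → k
    have hm2 : k ∈ LP K (k + 1) := by
      unfold LP
      split_ifs <;> simp
    have hx2 := reachP_dP (reachP_exists N K hN (k + 1) (by omega) (by omega))
    have hd2 := dP_le (reachP.step hx2 hm2 (by omega))
    have : min (fB N (k - 1)) (fB N (k + 1)) = fB N (k - 1) ∨
        min (fB N (k - 1)) (fB N (k + 1)) = fB N (k + 1) := min_choice _ _
    rcases this with hmin | hmin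
    · rw [hmin]; omega
    · rw [hmin]; omega

-- the pruned distance dominates ... wait: pruned reach implies unpruned reach
lemma dU_le_dP (N K : Int) (h : ∃ t, reachP N K t K) : dU N K ≤ dP N K K :=
  dU_le (reachP_reachU (reachP_dP h))

-- combining the three bounds: the recursion computes the pruned BFS distance
lemma fB_eq_dP (N K : Int) (hN : -1 ≤ N) (hNK : N < K) (hK : 0 ≤ K) :
    fB N K = (dP N K K : Int) := by
  have h1 := dP_le_fB N K hN hK K (by omega) (by omega) (fun _ => le_refl K)
  have h2 := fB_le_dU N hN K (by omega)
  have h3 := dU_le_dP N K (reachP_K N K hN hNK)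
  have h4 : (dU N K : Int) ≤ (dP N K K : Int) := by exact_mod_cast h3
  omega

-- ---------- the level BFS computes the pruned distance ----------

-- membership characterisation of B-side inner loop (used as proof scaffolding)
lemma stepBL_char (K : Int) :
    ∀ (ys nxt : List Int) (v : PySem.Set Int),
      (stepBL K ys nxt v = none ↔ K ∈ ys) ∧
      (K ∉ ys → ∃ nxt' v', stepBL K ys nxt v = some (nxt', v') ∧
        (∀ z : Int, z ∈ v' ↔ z ∈ v ∨ (z ∈ ys ∧ 0 ≤ z)) ∧
        (∀ z : Int, z ∈ nxt' ↔ z ∈ nxt ∨ (z ∈ ys ∧ 0 ≤ z ∧ z ∉ v))) := by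
  intro ys
  induction ys with
  | nil =>
    intro nxt v
    constructor
    · simp [stepBL]
    · intro _
      exact ⟨nxt, v, by simp [stepBL], by simp, by simp⟩
  | cons y rest ih =>
    intro nxt v
    by_cases hyK : y = K
    · subst hyK
      constructor
      · simp [stepBL]
      · intro h; simp at h
    · by_cases hc : 0 ≤ y ∧ PySem.Set.contains v y = false
      · have he : stepBL K (y :: rest) nxt v =
            stepBL K rest (nxt ++ [y]) (PySem.Set.add v y) := by
          simp only [stepBL, if_neg hyK, if_pos hc]
        obtain ⟨ihn, ihs⟩ := ih (nxt ++ [y]) (PySem.Set.add v y)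
        constructor
        ·
          rw [he, ihn]
          constructor
          · exact fun h => List.mem_cons_of_mem y h
          · intro h
            rcases List.mem_cons.1 h with h' | h'
            · exact absurd h'.symm hyK
            · exact h'
        · intro hK
          have hKrest : K ∉ rest := fun h => hK (List.mem_cons_of_mem y h)
          obtain ⟨nxt', v', h1, h2, h3⟩ := ihs hKrest
          refine ⟨nxt', v', by rw [he]; exact h1, ?_, ?_⟩
          · intro z
            rw [h2 z, PySem.Set.mem_add]
            constructor
            · rintro ((hz | hz) | hz)
              · exact Or.inl hz
              · subst hz; exact Or.inr ⟨by simp, hc.1⟩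
              · exact Or.inr ⟨List.mem_cons_of_mem y hz.1, hz.2⟩
            · rintro (hz | ⟨hz, hz0⟩)
              · exact Or.inl (Or.inl hz)
              · rcases List.mem_cons.1 hz with rfl | hz
                · exact Or.inl (Or.inr rfl)
                · exact Or.inr ⟨hz, hz0⟩
          · intro z
            rw [h3 z]
            have hyv : y ∉ v := by
              have := hc.2
              intro hmem
              rw [(PySem.Set.contains_iff v y).2 hmem] at this
              exact absurd this (by simp)
            constructor
            · rintro (hz | ⟨hz, hz0, hzv⟩)
              · rcases List.mem_append.1 hz with hz | hz
                · exact Or.inl hz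
                · have : z = y := by simpa using hz
                  subst this
                  exact Or.inr ⟨by simp, hc.1, hyv⟩
              · rw [PySem.Set.mem_add] at hzv
                exact Or.inr ⟨List.mem_cons_of_mem y hz, hz0, fun h => hzv (Or.inl h)⟩
            · rintro (hz | ⟨hz, hz0, hzv⟩)
              · exact Or.inl (List.mem_append.2 (Or.inl hz))
              · rcases List.mem_cons.1 hz with rfl | hz
                · exact Or.inl (List.mem_append.2 (Or.inr (by simp)))
                · by_cases hzy : z = y
                  · subst hzy
                    exact Or.inl (List.mem_append.2 (Or.inr (by simp)))
                  · refine Or.inr ⟨hz, hz0, ?_⟩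
                    rw [PySem.Set.mem_add]
                    rintro (h | h)
                    · exact hzv h
                    · exact hzy h
      · have he : stepBL K (y :: rest) nxt v = stepBL K rest nxt v := by
          simp only [stepBL, if_neg hyK, if_neg hc]
        obtain ⟨ihn, ihs⟩ := ih nxt v
        have hy' : ¬ (0 ≤ y ∧ y ∉ v) := by
          intro ⟨h0, hv⟩
          apply hc
          refine ⟨h0, ?_⟩
          rw [Bool.eq_false_iff, Ne, PySem.Set.contains_iff]
          exact hv
        constructor
        ·
          rw [he, ihn]
          constructor
          · exact fun h => List.mem_cons_of_mem y h
          · intro h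
            rcases List.mem_cons.1 h with h' | h'
            · exact absurd h'.symm hyK
            · exact h'
        · intro hK
          have hKrest : K ∉ rest := fun h => hK (List.mem_cons_of_mem y h)
          obtain ⟨nxt', v', h1, h2, h3⟩ := ihs hKrest
          refine ⟨nxt', v', by rw [he]; exact h1, ?_, ?_⟩
          · intro z
            rw [h2 z]
            constructor
            · rintro (hz | ⟨hz, hz0⟩)
              · exact Or.inl hz
              · exact Or.inr ⟨List.mem_cons_of_mem y hz, hz0⟩
            · rintro (hz | ⟨hz, hz0⟩)
              · exact Or.inl hz
              · rcases List.mem_cons.1 hz with rfl | hz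
                · -- z = y: y < 0 or y ∈ v; y < 0 contradicts hz0, so y ∈ v
                  by_cases h0 : 0 ≤ z
                  · have : z ∈ v := by
                      by_contra hvv
                      exact hy' ⟨h0, hvv⟩
                    exact Or.inl this
                  · omega
                · exact Or.inr ⟨hz, hz0⟩
          · intro z
            rw [h3 z]
            constructor
            · rintro (hz | ⟨hz, hz0, hzv⟩)
              · exact Or.inl hz
              · exact Or.inr ⟨List.mem_cons_of_mem y hz, hz0, hzv⟩
            · rintro (hz | ⟨hz, hz0, hzv⟩)
              · exact Or.inl hz
              · rcases List.mem_cons.1 hz with rfl | hz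
                · exact absurd ⟨hz0, hzv⟩ hy'
                · exact Or.inr ⟨hz, hz0, hzv⟩

-- membership characterisation of one whole level expansion
lemma expandBL_char (K : Int) :
    ∀ (F acc : List Int) (v : PySem.Set Int),
      (expandBL K F acc v = none ↔ ∃ x ∈ F, K ∈ LP K x) ∧
      ((¬ ∃ x ∈ F, K ∈ LP K x) → ∃ F' v', expandBL K F acc v = some (F', v') ∧
        (∀ z : Int, z ∈ v' ↔ z ∈ v ∨ (0 ≤ z ∧ ∃ x ∈ F, z ∈ LP K x)) ∧
        (∀ z : Int, z ∈ F' ↔ z ∈ acc ∨ (0 ≤ z ∧ z ∉ v ∧ ∃ x ∈ F, z ∈ LP K x))) := by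
  intro F
  induction F with
  | nil =>
    intro acc v
    constructor
    · simp [expandBL]
    · intro _
      exact ⟨acc, v, by simp [expandBL], by simp, by simp⟩
  | cons x rest ih =>
    intro acc v
    have hLP : (if x > K then [x - 1] else [x + 1, x - 1, x * 2]) = LP K x := rfl
    obtain ⟨sn, ss⟩ := stepBL_char K (LP K x) acc v
    by_cases hhit : K ∈ LP K x
    · have hsn : stepBL K (LP K x) acc v = none := sn.2 hhit
      have hnone : expandBL K (x :: rest) acc v = none := by
        simp only [expandBL, hLP, hsn]
      constructor
      · rw [hnone]
        constructor
        · intro _; exact ⟨x, by simp, hhit⟩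
        · intro _; rfl
      · intro h
        exact absurd ⟨x, by simp, hhit⟩ h
    · obtain ⟨nxt1, v1, h1, h2, h3⟩ := ss hhit
      have he : expandBL K (x :: rest) acc v = expandBL K rest nxt1 v1 := by
        simp only [expandBL, hLP, h1]
      obtain ⟨ihn, ihs⟩ := ih nxt1 v1
      constructor
      · rw [he, ihn]
        constructor
        · rintro ⟨y, hy, hKy⟩
          exact ⟨y, List.mem_cons_of_mem x hy, hKy⟩
        · rintro ⟨y, hy, hKy⟩
          rcases List.mem_cons.1 hy with rfl | hy
          · exact absurd hKy hhit
          · exact ⟨y, hy, hKy⟩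
      · intro hno
        have hnorest : ¬ ∃ y ∈ rest, K ∈ LP K y := by
          rintro ⟨y, hy, hKy⟩
          exact hno ⟨y, List.mem_cons_of_mem x hy, hKy⟩
        obtain ⟨F', v', g1, g2, g3⟩ := ihs hnorest
        refine ⟨F', v', by rw [he]; exact g1, ?_, ?_⟩
        · intro z
          rw [g2 z, h2 z]
          constructor
          · rintro ((hz | ⟨hz1, hz2⟩) | ⟨hz0, y, hy, hzy⟩)
            · exact Or.inl hz
            · exact Or.inr ⟨hz2, x, by simp, hz1⟩
            · exact Or.inr ⟨hz0, y, List.mem_cons_of_mem x hy, hzy⟩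
          · rintro (hz | ⟨hz0, y, hy, hzy⟩)
            · exact Or.inl (Or.inl hz)
            · rcases List.mem_cons.1 hy with rfl | hy
              · exact Or.inl (Or.inr ⟨hzy, hz0⟩)
              · exact Or.inr ⟨hz0, y, hy, hzy⟩
        · intro z
          rw [g3 z, h3 z]
          constructor
          · rintro ((hz | ⟨hz1, hz2, hz3⟩) | ⟨hz0, hzv, y, hy, hzy⟩)
            · exact Or.inl hz
            · exact Or.inr ⟨hz2, hz3, x, by simp, hz1⟩
            · rw [h2 z] at hzv
              refine Or.inr ⟨hz0, fun h => hzv (Or.inl h), y, List.mem_cons_of_mem x hy, hzy⟩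
          · rintro (hz | ⟨hz0, hzv, y, hy, hzy⟩)
            · exact Or.inl (Or.inl hz)
            · rcases List.mem_cons.1 hy with rfl | hy
              · exact Or.inl (Or.inr ⟨hzy, hz0, hzv⟩)
              · by_cases hz1 : z ∈ v1
                · rw [h2 z] at hz1
                  rcases hz1 with hz1 | ⟨hz1, _⟩
                  · exact absurd hz1 hzv
                  · exact Or.inl (Or.inr ⟨hz1, hz0, hzv⟩)
                · exact Or.inr ⟨hz0, hz1, y, hy, hzy⟩

-- along a shortest derivation, every prefix length is some node's exact distance
lemma dP_chain (N K : Int) :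
    ∀ (t : Nat) (y : Int), reachP N K t y → ∀ T, T ≤ dP N K y →
      ∃ x, (∃ t', reachP N K t' x) ∧ dP N K x = T := by
  intro t
  induction t with
  | zero =>
    intro y hy T hT
    have h0 : dP N K y = 0 := Nat.le_antisymm (dP_le hy) (Nat.zero_le _)
    rw [h0] at hT
    obtain rfl : T = 0 := Nat.le_zero.1 hT
    exact ⟨y, ⟨0, hy⟩, h0⟩
  | succ t ih =>
    intro y hy T hT
    obtain ⟨x, hx, hm, hy0⟩ := reachP_succ hy
    have hxy : dP N K y ≤ dP N K x + 1 :=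
      dP_le (reachP.step (reachP_dP ⟨t, hx⟩) hm hy0)
    by_cases hTx : T ≤ dP N K x
    · exact ih x hx T hTx
    · have : T = dP N K y := by omega
      exact ⟨y, ⟨t + 1, hy⟩, this.symm⟩

-- every level below the target's distance is non-empty
lemma level_nonempty (N K : Int) (hr : ∃ t, reachP N K t K) :
    ∀ T, T < dP N K K →
      ∃ x, reachP N K T x ∧ ∀ t < T, ¬ reachP N K t x := by
  intro T hT
  obtain ⟨t0, h0⟩ := hr
  obtain ⟨x, hxr, hxd⟩ := dP_chain N K t0 K h0 T (by omega)
  refine ⟨x, ?_, ?_⟩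
  · have := reachP_dP hxr
    rwa [hxd] at this
  · intro t ht hreach
    have := dP_le hreach
    omega

-- the level BFS returns exactly the pruned distance
lemma runBL_eq (N K : Int) (hK : 0 ≤ K) (hr : ∃ t, reachP N K t K) :
    ∀ (fuel T : Nat) (F : List Int) (v : PySem.Set Int),
      (∀ x : Int, x ∈ F ↔ (reachP N K T x ∧ ∀ t < T, ¬ reachP N K t x)) →
      (∀ x : Int, x ∈ v ↔ ∃ t ≤ T, reachP N K t x) →
      T < dP N K K →
      dP N K K ≤ T + fuel →
      runBL K fuel F (T : Int) v = some ((dP N K K : Nat) : Int) := by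
  intro fuel
  induction fuel with
  | zero => intro T F v _ _ h1 h2; omega
  | succ fuel ih =>
    intro T F v hF hv hT hfuel
    obtain ⟨x0, hx0r, hx0m⟩ := level_nonempty N K hr T hT
    have hx0F : x0 ∈ F := (hF x0).2 ⟨hx0r, hx0m⟩
    rcases hFs : F with _ | ⟨f0, F0⟩
    · subst hFs; simp at hx0F
    · subst hFs
      obtain ⟨en, es⟩ := expandBL_char K (f0 :: F0) [] v
      by_cases hhit : ∃ x ∈ f0 :: F0, K ∈ LP K x
      · -- K found at level T+1
        have : expandBL K (f0 :: F0) [] v = none := en.2 hhit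
        simp only [runBL, this]
        obtain ⟨x, hxF, hKL⟩ := hhit
        have hxr : reachP N K T x := ((hF x).1 hxF).1
        have : reachP N K (T + 1) K := reachP.step hxr hKL hK
        have hle : dP N K K ≤ T + 1 := dP_le this
        have hdp : dP N K K = T + 1 := by omega
        rw [hdp]
        push_cast
        rfl
      · obtain ⟨F', v', g1, g2, g3⟩ := es hhit
        simp only [runBL, g1]
        -- the distance to K is strictly more than T + 1
        have hd1 : T + 1 < dP N K K := by
          rcases Nat.lt_or_ge (T + 1) (dP N K K) with h | h
          · exact h
          · exfalso
            have hdp : dP N K K = T + 1 := by omega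
            have hre := reachP_dP hr
            rw [hdp] at hre
            obtain ⟨x, hx, hm, _⟩ := reachP_succ hre
            apply hhit
            refine ⟨x, (hF x).2 ⟨hx, ?_⟩, hm⟩
            intro t ht hreach
            have : dP N K K ≤ t + 1 := dP_le (reachP.step hreach hm hK)
            omega
        have hF' : ∀ x : Int, x ∈ F' ↔
            (reachP N K (T + 1) x ∧ ∀ t < T + 1, ¬ reachP N K t x) := by
          intro z
          rw [g3 z]
          simp only [List.not_mem_nil, false_or]
          constructor
          · rintro ⟨hz0, hzv, x, hxF, hzL⟩
            have hxr : reachP N K T x := ((hF x).1 hxF).1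
            refine ⟨reachP.step hxr hzL hz0, ?_⟩
            intro t ht hreach
            exact (by rw [hv z] at hzv; exact hzv ⟨t, by omega, hreach⟩ : False)
          · rintro ⟨hz, hzmin⟩
            obtain ⟨x, hx, hm, hz0⟩ := reachP_succ hz
            refine ⟨hz0, ?_, x, ?_, hm⟩
            · rw [hv z]
              rintro ⟨t, ht, hreach⟩
              exact hzmin t (by omega) hreach
            · refine (hF x).2 ⟨hx, ?_⟩
              intro t ht hreach
              exact hzmin (t + 1) (by omega) (reachP.step hreach hm hz0)
        have hv' : ∀ x : Int, x ∈ v' ↔ ∃ t ≤ T + 1, reachP N K t x := by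
          intro z
          rw [g2 z]
          constructor
          · rintro (hz | ⟨hz0, x, hxF, hzL⟩)
            · obtain ⟨t, ht, hreach⟩ := (hv z).1 hz
              exact ⟨t, by omega, hreach⟩
            · have hxr : reachP N K T x := ((hF x).1 hxF).1
              exact ⟨T + 1, le_refl _, reachP.step hxr hzL hz0⟩
          · rintro ⟨t, ht, hreach⟩
            rcases Nat.lt_or_ge t (T + 1) with h | h
            · exact Or.inl ((hv z).2 ⟨t, by omega, hreach⟩)
            · have : t = T + 1 := by omega
              subst this
              obtain ⟨x, hx, hm, hz0⟩ := reachP_succ hreach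
              by_cases hxmin : ∀ t' < T, ¬ reachP N K t' x
              · exact Or.inr ⟨hz0, x, (hF x).2 ⟨hx, hxmin⟩, hm⟩
              · obtain ⟨t', ht'⟩ := not_forall.1 hxmin
                rw [Classical.not_imp, not_not] at ht'
                obtain ⟨ht', hreach'⟩ := ht'
                exact Or.inl ((hv z).2 ⟨t' + 1, by omega, reachP.step hreach' hm hz0⟩)
        have := ih (T + 1) F' v' hF' hv' hd1 (by omega)
        have hcast : ((T : Int) + 1) = ((T + 1 : Nat) : Int) := by push_cast; ring
        rw [hcast]
        exact this

-- ===== VERDICT (by name: the statement is the Claim_ definition above) =====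
theorem solution_spec : Claim_equal_solution := by
  intro N K _ hpre
  unfold Spec_solution solution solution_alt
  by_cases hNK : N = K
  · subst hNK
    rw [if_pos rfl, if_pos (le_refl N)]
    ring
  · rw [if_neg hNK]
    have hbridgeA : runA K (N.toNat + 4 * K.toNat + 8) [(N, 0)] [] ((∅ : Std.HashSet Int).insert N) =
        runAL K (N.toNat + 4 * K.toNat + 8) [(N, 0)] ([N] : PySem.Set Int) := by
      have := runA_bridge K (N.toNat + 4 * K.toNat + 8) [(N, 0)] []
        ((∅ : Std.HashSet Int).insert N) ([N] : PySem.Set Int) (init_set_mem N)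
      simpa using this
    rw [hbridgeA]
    by_cases hKN : K ≤ N
    · -- K < N, and Pre_ forces 0 ≤ K, 0 ≤ N here
      have hK : 0 ≤ K ∧ 0 ≤ N := by
        rcases hpre with h | h | h
        · exact absurd h hNK
        · exact ⟨h.2, h.1⟩
        · exfalso; omega
      have hKlt : K < N := lt_of_le_of_ne hKN (fun h => hNK h.symm)
      rw [if_pos hKN]
      set j : Nat := (N - K).toNat with hj
      have hNj : N = K + (j : Int) := by omega
      have hrun := runAL_chain K hK.1 j 0 ([N] : PySem.Set Int) (N.toNat + 4 * K.toNat + 8)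
        (by omega) (by omega)
        (by
          intro z hz
          simp at hz
          omega)
      rw [hNj] at hrun ⊢
      rw [hrun]
      simp only [Option.getD_some]
      omega
    · -- N < K : BFS distance on one side, the recursion on the other
      rw [if_neg hKN]
      have hNlt : N < K := by omega
      have hN1 : -1 ≤ N := by
        rcases hpre with h | h | h
        · exact absurd h hNK
        · omega
        · omega
      have hK0 : 0 ≤ K := by
        rcases hpre with h | h | h
        · exact absurd h hNK
        · omega
        · omega
      have hmap : [((N : Int), (0 : Int))] = [N].map (fun y => (y, (0 : Int))) := by simp
      rw [hmap]
      rw [sim K hK0 (2 * K.toNat + 4) [N] 0 [N] (N.toNat + 4 * K.toNat + 8)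
        (List.nodup_singleton N)
        (by intro x hx; simp at hx; omega)
        (by intro x hx; exact hx)
        (by simp; omega)
        (by simp; omega)
        (by simp; omega)]
      have hr : ∃ t, reachP N K t K := reachP_K N K hN1 hNlt
      have hdpos : 0 < dP N K K := by
        rcases ht : dP N K K with _ | t
        · exfalso
          have := reachP_dP hr
          rw [ht] at this
          exact hNK (reachP_zero this).symm
        · omega
      have hdub : (dP N K K : Int) ≤ K - N := by
        obtain ⟨t, ht⟩ := hr
        have h1 := dP_le (reachP_incr N K hN1 (K - N).toNat (by omega))
        have he : N + ((K - N).toNat : Int) = K := by omega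
        rw [he] at h1
        omega
      have hrunBL := runBL_eq N K hK0 hr (2 * K.toNat + 4) 0 [N] [N]
        (by
          intro x
          simp only [List.mem_singleton]
          constructor
          · rintro rfl
            exact ⟨reachP.base, by omega⟩
          · rintro ⟨hx, _⟩
            exact reachP_zero hx)
        (by
          intro x
          simp only [List.mem_singleton]
          constructor
          · rintro rfl
            exact ⟨0, le_refl _, reachP.base⟩
          · rintro ⟨t, ht, hx⟩
            obtain rfl : t = 0 := Nat.le_zero.1 ht
            exact reachP_zero hx)
        hdpos
        (by omega)
      have hc0 : ((0 : Nat) : Int) = (0 : Int) := rfl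
      rw [hc0] at hrunBL
      rw [hrunBL]
      simp only [Option.getD_some]
      rw [fBf_eq_fB N (2 * K.toNat + 4) K (by split_ifs <;> omega)]
      exact (fB_eq_dP N K hN1 hNlt hK0).symm
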